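-- pv_equiv track=rewrite | github.com/coke05288/Algorithm-Python | BruteForce/Baekjoon-16968-차량번호판1.py | recur_solution
-- ===== SOURCE A (Python) =====
-- def recur_solution(_s, _index, _last):
--
--     # Base-Case
--     if len(_s) == _index:
--         return 1
--
--     start = ord('a') if _s[_index] == 'c' else ord('0')
--     end = ord('z') if _s[_index] == 'c' else ord('9')
--
--     answer = 0
--
--     for i in range(start, end+1):
--         if i != _last:
--             answer += recur_solution(_s, _index + 1, i)
--
--     return answer
-- ===== SOURCE B (Python) =====
-- def recur_solution(_s, _index, _last):
--     # Closed-form product: each position contributes its alphabet size,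
--     # minus 1 when the previous choice (initially _last, then the previous
--     # position's whole alphabet) lies inside this position's alphabet.
--     ans = 1
--     lo, hi = _last, _last
--     for j in range(_index, len(_s)):
--         if _s[j] == 'c':
--             nlo, nhi, size = ord('a'), ord('z'), 26
--         else:
--             nlo, nhi, size = ord('0'), ord('9'), 10
--         ans *= size - (1 if nlo <= lo and hi <= nhi else 0)
--         lo, hi = nlo, nhi
--     return ans
-- ===== Notes on version B (the rewrite author's own statement) =====
-- stated objective: alternative
-- what changed: Replaced the recursion that enumerates every plate with a single pass over the positions multiplying per-position factors (alphabet size, minus 1 when the previous choice's alphabet contains this position's, or initially when _last lies in the first alphabet).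
import Mathlib
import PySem

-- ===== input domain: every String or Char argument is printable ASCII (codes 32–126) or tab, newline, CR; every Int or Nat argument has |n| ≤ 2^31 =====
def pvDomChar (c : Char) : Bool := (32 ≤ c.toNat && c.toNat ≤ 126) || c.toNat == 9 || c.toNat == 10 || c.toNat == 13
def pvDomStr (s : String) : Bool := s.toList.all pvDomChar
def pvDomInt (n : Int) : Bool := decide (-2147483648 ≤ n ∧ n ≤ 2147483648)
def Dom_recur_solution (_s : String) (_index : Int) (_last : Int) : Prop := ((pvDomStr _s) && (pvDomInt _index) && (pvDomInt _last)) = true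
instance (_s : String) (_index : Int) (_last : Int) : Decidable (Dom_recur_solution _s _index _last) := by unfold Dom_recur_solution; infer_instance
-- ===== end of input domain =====

-- B replaces A's recursive enumeration of every plate by a single pass multiplying per-position factors.

-- ===== PORT A =====
def recur_solution (_s : String) (_index : Int) (_last : Int) : Int :=
  if (PySem.Str.len _s) = _index then 1
  else
    match h2 : PySem.Str.pyGet? _s _index with
    | none => 0  -- Python raises IndexError here; excluded by Pre_
    | some ch =>
      let start : Int := if ch = 'c' then 97 else 48   -- ord('a') / ord('0')
      let e : Int := if ch = 'c' then 122 else 57      -- ord('z') / ord('9')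
      (PySem.List.pyRange start (e + 1) 1).foldl
        (fun answer i => if i ≠ _last then answer + recur_solution _s (_index + 1) i else answer) 0
termination_by (PySem.Str.len _s - _index).toNat
decreasing_by
  simp only [PySem.Str.pyGet?_eq, PySem.Chars.pyGet?_eq_listPyGet?] at h2
  have hin : PySem.Raise.InRange _s.toList.length _index := by
    by_contra hc
    rw [(PySem.List.pyGet?_eq_none_iff _ _).mpr hc] at h2
    exact absurd h2.symm (by simp)
  simp only [PySem.Raise.InRange] at hin
  simp only [PySem.Str.len_eq]
  omega

-- ===== PORT B =====
def recur_solution_alt (_s : String) (_index : Int) (_last : Int) : Int :=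
  ((PySem.List.pyRange _index (PySem.Str.len _s) 1).foldl
    (fun st j =>
      match PySem.Str.pyGet? _s j with
      | none => st  -- Python raises IndexError here; excluded by Pre_
      | some ch =>
        let t : Int × Int × Int := if ch = 'c' then (97, 122, 26) else (48, 57, 10)
        (st.1 * (t.2.2 - (if t.1 ≤ st.2.1 ∧ st.2.2 ≤ t.2.1 then 1 else 0)), t.1, t.2.1))
    (1, _last, _last)).1

-- ===== PRECONDITION & SPEC =====
-- A indexes _s at every position from _index up; it raises IndexError iff _index is outside [-len(_s), len(_s)].
def Pre_recur_solution (_s : String) (_index : Int) (_last : Int) : Prop :=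
  -(PySem.Str.len _s) ≤ _index ∧ _index ≤ PySem.Str.len _s
instance (_s : String) (_index : Int) (_last : Int) : Decidable (Pre_recur_solution _s _index _last) := by unfold Pre_recur_solution; infer_instance
def pvWitness_recur_solution : String × Int × Int := ("cn", 0, 0)

def Spec_recur_solution (_s : String) (_index : Int) (_last : Int) (out : Int) : Prop := out = recur_solution_alt _s _index _last
instance (_s : String) (_index : Int) (_last : Int) (out : Int) : Decidable (Spec_recur_solution _s _index _last out) := by unfold Spec_recur_solution; infer_instance

-- ===== CLAIM (what is proved, stated in full; the proofs are below) =====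
def Claim_equal_recur_solution : Prop := ∀ (_s : String) (_index : Int) (_last : Int), Dom_recur_solution _s _index _last → Pre_recur_solution _s _index _last → Spec_recur_solution _s _index _last (recur_solution _s _index _last)

-- ===== LEMMAS AND PROOFS =====

-- the step function of B's loop (same term as in recur_solution_alt; alt_eq below is rfl)
def Bstep (s : String) (st : Int × Int × Int) (j : Int) : Int × Int × Int :=
  match PySem.Str.pyGet? s j with
  | none => st
  | some ch =>
    let t : Int × Int × Int := if ch = 'c' then (97, 122, 26) else (48, 57, 10)
    (st.1 * (t.2.2 - (if t.1 ≤ st.2.1 ∧ st.2.2 ≤ t.2.1 then 1 else 0)), t.1, t.2.1)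

theorem alt_eq (s : String) (i l : Int) :
    recur_solution_alt s i l = ((PySem.List.pyRange i (PySem.Str.len s) 1).foldl (Bstep s) (1, l, l)).1 := rfl

-- first component of B's fold is multiplicative in the accumulator
theorem Bfold_mul (s : String) (l : List Int) : ∀ (a lo hi : Int),
    ((l.foldl (Bstep s) (a, lo, hi)).1) = a * ((l.foldl (Bstep s) (1, lo, hi)).1) := by
  induction l with
  | nil => intro a lo hi; simp
  | cons j l ih =>
    intro a lo hi
    simp only [List.foldl_cons, Bstep]
    cases PySem.Str.pyGet? s j with
    | none => exact ih a lo hi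
    | some ch =>
      by_cases hc : ch = 'c' <;> simp [hc] <;>
        (conv_lhs => rw [ih]) <;> (conv_rhs => rw [ih]) <;> ring

-- the remaining product does not depend on whether the previous state is a
-- whole class interval or a single code inside it
theorem Bfold_const (s : String) (l : List Int) : ∀ (lo hi i : Int),
    ((lo = 97 ∧ hi = 122) ∨ (lo = 48 ∧ hi = 57)) → lo ≤ i → i ≤ hi →
    ((l.foldl (Bstep s) (1, i, i)).1) = ((l.foldl (Bstep s) (1, lo, hi)).1) := by
  induction l with
  | nil => intro lo hi i _ _ _; rfl
  | cons j l ih =>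
    intro lo hi i hcl hli hih
    simp only [List.foldl_cons, Bstep]
    cases PySem.Str.pyGet? s j with
    | none => exact ih lo hi i hcl hli hih
    | some ch =>
      rcases hcl with ⟨h1, h2⟩ | ⟨h1, h2⟩ <;> subst h1 <;> subst h2 <;>
        by_cases hc : ch = 'c' <;> simp [hc] <;>
        split_ifs with h <;> first | (exfalso; omega) | norm_num

-- closed form for A's inner summation loop when the summand is constant
theorem sumIf (T last : Int) : ∀ (n : Nat) (a b c : Int), (b - a).toNat = n → a ≤ b →
    (PySem.List.pyRange a b 1).foldl (fun ans i => if i ≠ last then ans + T else ans) c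
      = c + ((b - a) - (if a ≤ last ∧ last < b then 1 else 0)) * T := by
  intro n
  induction n with
  | zero =>
    intro a b c h0 hab
    rw [PySem.List.pyRange_one_eq_nil (by omega)]
    rw [show b - a = 0 from by omega,
        show (if a ≤ last ∧ last < b then (1:Int) else 0) = 0 from by split_ifs <;> omega]
    simp
  | succ n ih =>
    intro a b c h0 hab
    have hlt : a < b := by omega
    rw [PySem.List.pyRange_one_cons hlt]
    simp only [List.foldl_cons]
    rw [ih (a + 1) b (if a ≠ last then c + T else c) (by omega) (by omega)]
    by_cases hla : a = last
    · subst hla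
      simp only [ne_eq, not_true_eq_false, if_false]
      have e1 : (if a + 1 ≤ a ∧ a < b then (1:Int) else 0) = 0 := by split_ifs <;> omega
      have e2 : (if a ≤ a ∧ a < b then (1:Int) else 0) = 1 := by split_ifs <;> omega
      rw [e1, e2]
      ring
    · simp only [ne_eq, hla, not_false_eq_true, if_true]
      have e3 : ((b - (a + 1)) - (if a + 1 ≤ last ∧ last < b then (1:Int) else 0))
              = ((b - a) - (if a ≤ last ∧ last < b then (1:Int) else 0)) - 1 := by
        split_ifs <;> omega
      rw [e3]
      ring

theorem main_lemma (s : String) : ∀ (n : Nat) (idx last : Int),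
    -(s.toList.length : Int) ≤ idx → idx ≤ (s.toList.length : Int) →
    ((s.toList.length : Int) - idx).toNat = n →
    recur_solution s idx last = recur_solution_alt s idx last := by
  intro n
  induction n with
  | zero =>
    intro idx last _ hle h0
    have hidx : idx = (s.toList.length : Int) := by omega
    rw [recur_solution, alt_eq]
    rw [if_pos (by simp [PySem.Str.len_eq, hidx])]
    rw [PySem.List.pyRange_one_eq_nil (by simp [PySem.Str.len_eq, hidx])]
    rfl
  | succ n ih =>
    intro idx last hge hle h0
    have hlt : idx < (s.toList.length : Int) := by omega
    rw [recur_solution]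
    rw [if_neg (by simp only [PySem.Str.len_eq]; omega)]
    rw [alt_eq, PySem.Str.len_eq, PySem.List.pyRange_one_cons hlt]
    rw [List.foldl_cons]
    split
    · rename_i heq
      exfalso
      simp only [PySem.Str.pyGet?_eq, PySem.Chars.pyGet?_eq_listPyGet?] at heq
      rw [PySem.List.pyGet?_eq_none_iff _ _] at heq
      exact heq (by simp only [PySem.Raise.InRange]; omega)
    · rename_i ch' hch'
      have hch2 : PySem.List.pyGet? s.toList idx = some ch' := by simpa using hch'
      by_cases hc : ch' = 'c'
      · have hB : Bstep s (1, last, last) idx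
            = ((26:Int) - (if (97:Int) ≤ last ∧ last ≤ (122:Int) then 1 else 0), 97, 122) := by
          simp [Bstep, hch2, hc]
        rw [hB, Bfold_mul]
        simp only [hc, reduceIte]
        have hcong : List.foldl (fun answer i => if i ≠ last then answer + recur_solution s (idx + 1) i else answer) 0 (PySem.List.pyRange 97 (122 + 1) 1)
            = List.foldl (fun answer i => if i ≠ last then answer + ((PySem.List.pyRange (idx + 1) (s.toList.length : Int) 1).foldl (Bstep s) (1, 97, 122)).1 else answer) 0 (PySem.List.pyRange 97 (122 + 1) 1) := by
          refine PySem.List.foldl_congr_mem _ _ _ _ ?_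
          intro acc x hx
          rw [PySem.List.mem_pyRange_one] at hx
          by_cases hxl : x = last
          · rw [if_neg (not_not_intro hxl), if_neg (not_not_intro hxl)]
          · rw [if_pos hxl, if_pos hxl]
            congr 1
            rw [ih (idx + 1) x (by omega) (by omega) (by omega), alt_eq, PySem.Str.len_eq]
            exact Bfold_const s _ 97 122 x (Or.inl ⟨rfl, rfl⟩) (by omega) (by omega)
        rw [hcong]
        rw [sumIf ((PySem.List.pyRange (idx + 1) (s.toList.length : Int) 1).foldl (Bstep s) (1, 97, 122)).1 last 26 97 (122 + 1) 0 (by decide) (by decide)]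
        rw [if_congr (show ((97:Int) ≤ last ∧ last < 122 + 1) ↔ ((97:Int) ≤ last ∧ last ≤ 122) from by omega) rfl rfl]
        ring
      · have hB : Bstep s (1, last, last) idx
            = ((10:Int) - (if (48:Int) ≤ last ∧ last ≤ (57:Int) then 1 else 0), 48, 57) := by
          simp [Bstep, hch2, hc]
        rw [hB, Bfold_mul]
        simp only [hc, reduceIte]
        have hcong : List.foldl (fun answer i => if i ≠ last then answer + recur_solution s (idx + 1) i else answer) 0 (PySem.List.pyRange 48 (57 + 1) 1)
            = List.foldl (fun answer i => if i ≠ last then answer + ((PySem.List.pyRange (idx + 1) (s.toList.length : Int) 1).foldl (Bstep s) (1, 48, 57)).1 else answer) 0 (PySem.List.pyRange 48 (57 + 1) 1) := by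
          refine PySem.List.foldl_congr_mem _ _ _ _ ?_
          intro acc x hx
          rw [PySem.List.mem_pyRange_one] at hx
          by_cases hxl : x = last
          · rw [if_neg (not_not_intro hxl), if_neg (not_not_intro hxl)]
          · rw [if_pos hxl, if_pos hxl]
            congr 1
            rw [ih (idx + 1) x (by omega) (by omega) (by omega), alt_eq, PySem.Str.len_eq]
            exact Bfold_const s _ 48 57 x (Or.inr ⟨rfl, rfl⟩) (by omega) (by omega)
        rw [hcong]
        rw [sumIf ((PySem.List.pyRange (idx + 1) (s.toList.length : Int) 1).foldl (Bstep s) (1, 48, 57)).1 last 10 48 (57 + 1) 0 (by decide) (by decide)]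
        rw [if_congr (show ((48:Int) ≤ last ∧ last < 57 + 1) ↔ ((48:Int) ≤ last ∧ last ≤ 57) from by omega) rfl rfl]
        ring

-- ===== VERDICT (by name: the statement is the Claim_ definition above) =====
theorem recur_solution_spec : Claim_equal_recur_solution := by
  intro s idx last _ hpre
  unfold Spec_recur_solution
  obtain ⟨h1, h2⟩ := hpre
  simp only [PySem.Str.len_eq] at h1 h2
  exact main_lemma s _ idx last h1 h2 rfl
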